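-- pv_equiv track=rewrite | github.com/Moonlark-Dev/Moonlark | src/plugins/nonebot_plugin_chat/utils/splitter.py | _remove_leading_spaces
-- ===== SOURCE A (Python) =====
-- def _remove_leading_spaces(text: str) -> str:
--     """去除行首空格，但保留代码块内的空格"""
--     lines = text.split('\n')
--     result = []
--
--     in_code_block = False
--     for line in lines:
--         # 检查代码块开始/结束
--         if line.strip().startswith('```'):
--             in_code_block = not in_code_block
--             result.append(line)  # 代码块标记行保持原样
--         elif in_code_block:
--             result.append(line)  # 代码块内内容保持原样
--         else:
--             result.append(line.lstrip())  # 去除行首空格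
--
--     return '\n'.join(result)
-- ===== SOURCE B (Python) =====
-- def _remove_leading_spaces(text: str) -> str:
--     """去除行首空格，但保留代码块内的空格"""
--     def is_fence(line):
--         return line.strip().startswith('```')
--
--     out = []
--     rest = text.split('\n')
--     while True:
--         # outside segment: lstrip every line up to the next fence
--         i = 0
--         while i < len(rest) and not is_fence(rest[i]):
--             i += 1
--         out += [line.lstrip() for line in rest[:i]]
--         if i == len(rest):
--             break
--         out.append(rest[i])          # opening fence, kept raw
--         rest = rest[i + 1:]
--         # inside segment: keep lines raw up to the closing fence
--         j = 0
--         while j < len(rest) and not is_fence(rest[j]):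
--             j += 1
--         out += rest[:j]
--         if j == len(rest):
--             break
--         out.append(rest[j])          # closing fence, kept raw
--         rest = rest[j + 1:]
--     return '\n'.join(out)
-- ===== Notes on version B (the rewrite author's own statement) =====
-- stated objective: alternative
-- what changed: Replaces A's per-line loop with a mutable in_code_block flag by stateless segment processing: repeatedly scan to the next fence, emit the fence-free outside run lstripped and the following inside run raw, slicing the remaining lines off each round.
import Mathlib
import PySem

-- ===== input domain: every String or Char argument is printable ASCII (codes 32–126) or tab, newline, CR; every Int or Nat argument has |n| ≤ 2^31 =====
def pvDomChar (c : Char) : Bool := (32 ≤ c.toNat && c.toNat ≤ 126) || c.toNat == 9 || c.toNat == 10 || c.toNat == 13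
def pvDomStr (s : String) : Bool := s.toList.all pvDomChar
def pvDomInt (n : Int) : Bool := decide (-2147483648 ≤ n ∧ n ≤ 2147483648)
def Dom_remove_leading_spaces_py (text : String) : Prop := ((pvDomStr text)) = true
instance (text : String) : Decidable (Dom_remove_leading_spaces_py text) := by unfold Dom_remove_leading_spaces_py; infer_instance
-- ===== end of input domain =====

-- B replaces A's per-line in_code_block toggle with stateless segment processing: repeatedly slice off an outside run (lstripped) up to the next fence and an inside run (raw) up to the closing fence; objective: alternative decomposition, same cost.


-- ===== PORT A =====
-- single loop over the lines carrying (result, in_code_block); lines as List Char (exact via PySem.Chars)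
def remove_leading_spaces_py (text : String) : String :=
  let lines := PySem.Chars.splitOn text.toList ['\n']
  let res := lines.foldl (fun (s : List (List Char) × Bool) line =>
    if PySem.Chars.startswith (PySem.Chars.strip line) ['`', '`', '`'] then
      (s.1 ++ [line], !s.2)
    else if s.2 then
      (s.1 ++ [line], s.2)
    else
      (s.1 ++ [PySem.Chars.lstrip line], s.2)) ([], false)
  String.ofList (PySem.Chars.join ['\n'] res.1)

-- ===== PORT B =====
-- is_fence
def pvIsFence (l : List Char) : Bool :=
  PySem.Chars.startswith (PySem.Chars.strip l) ['`', '`', '`']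

-- the while-loop of Source B as structural recursion on the shrinking `rest`,
-- with the same `out` accumulator; the inner index scans are the take/drop
-- of the longest fence-free prefix (exactly what rest[:i] / rest[i+1:] compute)
def pvGoB (rest : List (List Char)) (out : List (List Char)) : List (List Char) :=
  let a := rest.takeWhile (fun l => !pvIsFence l)
  match hb : rest.dropWhile (fun l => !pvIsFence l) with
  | [] => out ++ a.map PySem.Chars.lstrip
  | f :: rest₂ =>
    let c := rest₂.takeWhile (fun l => !pvIsFence l)
    match hd : rest₂.dropWhile (fun l => !pvIsFence l) with
    | [] => out ++ a.map PySem.Chars.lstrip ++ [f] ++ c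
    | g :: rest₃ =>
      pvGoB rest₃ (out ++ a.map PySem.Chars.lstrip ++ [f] ++ c ++ [g])
termination_by rest.length
decreasing_by
  have h1 : (rest.dropWhile (fun l => !pvIsFence l)).length ≤ rest.length :=
    List.length_dropWhile_le _ _
  have h2 : (rest₂.dropWhile (fun l => !pvIsFence l)).length ≤ rest₂.length :=
    List.length_dropWhile_le _ _
  rw [hb] at h1; rw [hd] at h2
  simp at h1 h2; omega

def remove_leading_spaces_py_alt (text : String) : String :=
  String.ofList (PySem.Chars.join ['\n'] (pvGoB (PySem.Chars.splitOn text.toList ['\n']) []))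

-- ===== PRECONDITION & SPEC =====
def Spec_remove_leading_spaces_py (text : String) (out : String) : Prop := out = remove_leading_spaces_py_alt text
instance (text : String) (out : String) : Decidable (Spec_remove_leading_spaces_py text out) := by unfold Spec_remove_leading_spaces_py; infer_instance

-- ===== CLAIM (what is proved, stated in full; the proofs are below) =====
def Claim_equal_remove_leading_spaces_py : Prop := ∀ (text : String), Dom_remove_leading_spaces_py text → Spec_remove_leading_spaces_py text (remove_leading_spaces_py text)

-- ===== LEMMAS AND PROOFS =====
-- meaning of A's loop: per-line output given the current in_code_block flag b
def pvM (b : Bool) : List (List Char) → List (List Char)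
  | [] => []
  | l :: ls => (if pvIsFence l then l else if b then l else PySem.Chars.lstrip l)
      :: pvM (b ^^ pvIsFence l) ls

theorem pvFoldA (ls : List (List Char)) : ∀ (acc : List (List Char)) (b : Bool),
    (ls.foldl (fun (s : List (List Char) × Bool) line =>
      if PySem.Chars.startswith (PySem.Chars.strip line) ['`', '`', '`'] then
        (s.1 ++ [line], !s.2)
      else if s.2 then (s.1 ++ [line], s.2)
      else (s.1 ++ [PySem.Chars.lstrip line], s.2)) (acc, b)).1 = acc ++ pvM b ls := by
  induction ls with
  | nil => intro acc b; simp [pvM]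
  | cons l ls ih =>
    intro acc b
    simp only [List.foldl_cons, pvM]
    by_cases h : pvIsFence l = true
    · simp only [pvIsFence] at h
      simp [h, ih, pvIsFence]
    · simp only [pvIsFence] at h; rw [Bool.not_eq_true] at h
      by_cases hb : b = true
      · simp [h, hb, ih, pvIsFence]
      · rw [Bool.not_eq_true] at hb; subst hb; simp [h, ih, pvIsFence]

theorem pvM_false_append (a xs : List (List Char)) (h : ∀ l ∈ a, pvIsFence l = false) :
    pvM false (a ++ xs) = a.map PySem.Chars.lstrip ++ pvM false xs := by
  induction a with
  | nil => simp
  | cons l a ih =>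
    have hl : pvIsFence l = false := h l (by simp)
    simp only [List.cons_append, pvM, hl, List.map_cons, List.cons_append]
    simp [ih (fun x hx => h x (by simp [hx]))]

theorem pvM_true_append (a xs : List (List Char)) (h : ∀ l ∈ a, pvIsFence l = false) :
    pvM true (a ++ xs) = a ++ pvM true xs := by
  induction a with
  | nil => simp
  | cons l a ih =>
    have hl : pvIsFence l = false := h l (by simp)
    simp only [List.cons_append, pvM, hl]
    simp [ih (fun x hx => h x (by simp [hx]))]

theorem pvDropHead {α : Type} (p : α → Bool) : ∀ (l : List α) (x : α) (xs : List α),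
    l.dropWhile p = x :: xs → p x = false := by
  intro l
  induction l with
  | nil => intro x xs h; simp [List.dropWhile] at h
  | cons a l ih =>
    intro x xs h
    rw [List.dropWhile_cons] at h
    by_cases hp : p a = true
    · simp [hp] at h; exact ih x xs h
    · rw [Bool.not_eq_true] at hp
      simp [hp] at h
      obtain ⟨rfl, _⟩ := h
      exact hp

theorem pvTakeAll (rest : List (List Char)) :
    pvM false rest = (rest.takeWhile (fun l => !pvIsFence l)).map PySem.Chars.lstrip
      ++ pvM false (rest.dropWhile (fun l => !pvIsFence l)) := by
  have hall : ∀ l ∈ rest.takeWhile (fun l => !pvIsFence l), pvIsFence l = false := by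
    intro l hl; have := List.mem_takeWhile_imp hl; simpa using this
  conv_lhs => rw [← List.takeWhile_append_dropWhile (p := fun l => !pvIsFence l) (l := rest)]
  rw [pvM_false_append _ _ hall]

theorem pvTakeAllT (rest : List (List Char)) :
    pvM true rest = rest.takeWhile (fun l => !pvIsFence l)
      ++ pvM true (rest.dropWhile (fun l => !pvIsFence l)) := by
  have hall : ∀ l ∈ rest.takeWhile (fun l => !pvIsFence l), pvIsFence l = false := by
    intro l hl; have := List.mem_takeWhile_imp hl; simpa using this
  conv_lhs => rw [← List.takeWhile_append_dropWhile (p := fun l => !pvIsFence l) (l := rest)]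
  rw [pvM_true_append _ _ hall]

theorem pvGoB_eq (rest out : List (List Char)) : pvGoB rest out = out ++ pvM false rest := by
  induction rest, out using pvGoB.induct with
  | case1 rest out hb =>
    rw [pvGoB]
    split
    · rw [pvTakeAll rest, hb]; simp [pvM]
    · rename_i f rest₂ heq; rw [hb] at heq; cases heq
  | case2 rest out f rest₂ hb hd =>
    have hf : pvIsFence f = true := by
      have := pvDropHead _ _ _ _ hb; simpa using this
    rw [pvGoB]
    split
    · rename_i heq; rw [hb] at heq; cases heq
    · rename_i f' rest₂' heq
      rw [hb] at heq; injection heq with h1 h2; subst h1; subst h2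
      split
      · rw [pvTakeAll rest, hb]
        simp only [pvM, hf]
        rw [show (false ^^ true) = true from rfl, pvTakeAllT rest₂, hd]
        simp [pvM]
      · rename_i g rest₃ heq2; rw [hd] at heq2; cases heq2
  | case3 rest out a f rest₂ hb c g rest₃ hd ih =>
    have hf : pvIsFence f = true := by
      have := pvDropHead _ _ _ _ hb; simpa using this
    have hg : pvIsFence g = true := by
      have := pvDropHead _ _ _ _ hd; simpa using this
    rw [pvGoB]
    split
    · rename_i heq; rw [hb] at heq; cases heq
    · rename_i f' rest₂' heq
      rw [hb] at heq; injection heq with h1 h2; subst h1; subst h2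
      split
      · rename_i heq2; rw [hd] at heq2; cases heq2
      · rename_i g' rest₃' heq2
        rw [hd] at heq2; injection heq2 with h3 h4; subst h3; subst h4
        rw [ih]
        rw [pvTakeAll rest, hb]
        simp only [pvM, hf]
        rw [show (false ^^ true) = true from rfl, pvTakeAllT rest₂, hd]
        simp only [pvM, hg]
        rw [show (true ^^ true) = false from rfl]
        show out ++ List.map PySem.Chars.lstrip a ++ [f] ++ c ++ [g] ++ pvM false rest₃ = _
        simp [a, c]

-- ===== VERDICT (by name: the statement is the Claim_ definition above) =====
theorem remove_leading_spaces_py_spec : Claim_equal_remove_leading_spaces_py := by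
  intro text _
  show remove_leading_spaces_py text = remove_leading_spaces_py_alt text
  unfold remove_leading_spaces_py remove_leading_spaces_py_alt
  simp only [pvFoldA, pvGoB_eq, List.nil_append]
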